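-- pv_equiv track=rewrite | github.com/kyrolyte/py-bin | chss/file_fmt_chscbf_formatmonth.py | merge_headers_and_paragraphs
-- ===== SOURCE A (Python) =====
-- from typing import List
--
-- def merge_headers_and_paragraphs(lines: List[str]) -> List[str]:
--     """
--     Return a new list of lines after applying the two transformations.
--     """
--     out: List[str] = []
--     i = 0
--     n = len(lines)
--
--     while i < n:
--         line = lines[i]
--         stripped = line.strip()
--
--         # ---------- 1) Header merging -------------
--         if stripped.startswith("## "):
--             # flush any pending paragraph
--             # (there should be none at this point, but we keep the logic for completeness)
--             # gather h2 text
--             h2_text = stripped[3:].strip()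
--
--             # skip following blank lines
--             j = i + 1
--             while j < n and lines[j].strip() == "":
--                 j += 1
--
--             # if we hit a h3 header immediately after skipping blanks
--             if j < n and lines[j].strip().startswith("### "):
--                 h3_text = lines[j].strip()[4:].strip()
--                 new_header = f"## {h2_text} - {h3_text}\n"
--                 out.append(new_header)
--
--                 # skip the h3 line
--                 i = j + 1
--
--                 # skip any blank lines that follow the h3 header
--                 while i < n and lines[i].strip() == "":
--                     i += 1
--
--                 # put a single blank line after the combined header
--                 out.append("\n")
--                 continue
--             else:
--                 # no h3 under this h2 – keep the header as is
--                 out.append(line)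
--                 i += 1
--                 continue
--
--         # ---------- 2) Paragraph collapsing -------------
--         # If this is a header (## or ###) keep it as is
--         if stripped.startswith("#"):
--             out.append(line)
--             i += 1
--             continue
--
--         # Blank line – flush any pending paragraph
--         if stripped == "":
--             out.append(line)
--             i += 1
--             continue
--
--         # Non‑header, non‑blank line – part of a paragraph
--         # accumulate consecutive such lines
--         paragraph = [line.rstrip("\n")]
--         i += 1
--         while i < n:
--             nxt = lines[i]
--             nxt_strip = nxt.strip()
--             if nxt_strip == "" or nxt_strip.startswith("#"):
--                 break
--             paragraph.append(nxt.rstrip("\n"))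
--             i += 1
--
--         # Write the collapsed paragraph
--         out.append(" ".join(paragraph) + "\n")
--         # continue – i already points to the next line (header/blank)
--     return out
-- ===== SOURCE B (Python) =====
-- from typing import List
--
--
-- def _merge_headers(lines: List[str]) -> List[str]:
--     """Pass 1: merge each '## ' header with a following '### ' header."""
--     out: List[str] = []
--     i = 0
--     n = len(lines)
--     while i < n:
--         line = lines[i]
--         s = line.strip()
--         if s.startswith("## "):
--             j = i + 1
--             while j < n and lines[j].strip() == "":
--                 j += 1
--             if j < n and lines[j].strip().startswith("### "):
--                 h2 = s[3:].strip()
--                 h3 = lines[j].strip()[4:].strip()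
--                 out.append("## " + h2 + " - " + h3 + "\n")
--                 out.append("\n")
--                 i = j + 1
--                 while i < n and lines[i].strip() == "":
--                     i += 1
--                 continue
--         out.append(line)
--         i += 1
--     return out
--
--
-- def _collapse_paragraphs(lines: List[str]) -> List[str]:
--     """Pass 2: join runs of consecutive body lines into single lines."""
--     out: List[str] = []
--     buf: List[str] = []
--     for line in lines:
--         s = line.strip()
--         if s == "" or s.startswith("#"):
--             if buf:
--                 out.append(" ".join(buf) + "\n")
--                 buf = []
--             out.append(line)
--         else:
--             buf.append(line.rstrip("\n"))
--     if buf: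
--         out.append(" ".join(buf) + "\n")
--     return out
--
--
-- def merge_headers_and_paragraphs(lines: List[str]) -> List[str]:
--     return _collapse_paragraphs(_merge_headers(lines))
-- ===== Notes on version B (the rewrite author's own statement) =====
-- stated objective: simpler
-- what changed: A's single interleaved scan (header merging and paragraph collapsing mixed in one index loop) is split into two sequential passes: a merge-only pass over the lines, then a buffer-fold that collapses runs of body lines.
import Mathlib
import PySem

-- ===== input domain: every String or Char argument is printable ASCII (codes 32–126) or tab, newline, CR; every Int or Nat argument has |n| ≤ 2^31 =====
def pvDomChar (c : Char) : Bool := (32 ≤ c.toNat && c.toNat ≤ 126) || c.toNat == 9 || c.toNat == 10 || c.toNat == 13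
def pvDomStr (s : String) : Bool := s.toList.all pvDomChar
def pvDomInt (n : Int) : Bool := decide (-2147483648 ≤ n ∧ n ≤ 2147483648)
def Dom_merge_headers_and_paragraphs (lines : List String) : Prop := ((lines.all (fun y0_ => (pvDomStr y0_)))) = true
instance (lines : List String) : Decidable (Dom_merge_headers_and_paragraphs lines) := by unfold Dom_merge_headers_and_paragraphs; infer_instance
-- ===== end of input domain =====

set_option maxHeartbeats 1000000


-- B re-implements the single interleaved scan of A as two sequential passes (header merge, then a
-- buffer-fold paragraph collapse); objective: simpler decomposition, same exact output.

-- shared helpers (both Pythons test lines with the same strip/startswith conditions)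
-- exact port of s.rstrip("\n"): drop trailing '\n' characters
def rstripNl (s : String) : String := String.ofList ((s.toList.reverse.dropWhile (fun c => c == '\n')).reverse)
def isBlank (s : String) : Bool := PySem.Str.strip s == ""
def isHash (s : String) : Bool := PySem.Str.startswith (PySem.Str.strip s) "#"
def keepBody (s : String) : Bool := !(isBlank s || isHash s)
-- exact port of the f-string f"## {h2} - {h3}\n"
def mkHeader (h2 h3 : String) : String :=
  String.ofList ('#' :: '#' :: ' ' :: (h2.toList ++ [' ', '-', ' '] ++ h3.toList ++ ['\n']))
-- exact port of " ".join(paragraph) + "\n"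
def joinPara (para : List String) : String :=
  String.ofList ((PySem.Str.join " " para).toList ++ ['\n'])

-- ===== PORT A =====
def merge_headers_and_paragraphs : List String → List String
  | [] => []
  | line :: ls =>
    let stripped := PySem.Str.strip line
    if PySem.Str.startswith stripped "## " then
      let h2 := PySem.Str.strip (PySem.Str.slice stripped (some 3) none)
      match hdw : ls.dropWhile isBlank with           -- skip following blank lines (j loop)
      | c :: cs =>
        if PySem.Str.startswith (PySem.Str.strip c) "### " then
          let h3 := PySem.Str.strip (PySem.Str.slice (PySem.Str.strip c) (some 4) none)
          mkHeader h2 h3 :: "\n" ::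
            merge_headers_and_paragraphs (cs.dropWhile isBlank)  -- skip blanks after the h3
        else line :: merge_headers_and_paragraphs ls
      | [] => line :: merge_headers_and_paragraphs ls
    else if PySem.Str.startswith stripped "#" then
      line :: merge_headers_and_paragraphs ls
    else if stripped == "" then
      line :: merge_headers_and_paragraphs ls
    else
      joinPara (rstripNl line :: (ls.takeWhile keepBody).map rstripNl) ::
        merge_headers_and_paragraphs (ls.dropWhile keepBody)
termination_by ls => ls.length
decreasing_by
  · have h1 := List.length_dropWhile_le isBlank ls
    rw [hdw] at h1
    have h2 := List.length_dropWhile_le isBlank cs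
    simp at h1 ⊢; omega
  · simp
  · simp
  · simp
  · simp
  · have := List.length_dropWhile_le keepBody ls
    simp; omega

-- ===== PORT B =====
-- pass 1 (Source B _merge_headers): only header merging, everything else copied verbatim
def mergePass : List String → List String
  | [] => []
  | line :: ls =>
    if PySem.Str.startswith (PySem.Str.strip line) "## " then
      match hdw : ls.dropWhile isBlank with
      | c :: cs =>
        if PySem.Str.startswith (PySem.Str.strip c) "### " then
          mkHeader (PySem.Str.strip (PySem.Str.slice (PySem.Str.strip line) (some 3) none))
                   (PySem.Str.strip (PySem.Str.slice (PySem.Str.strip c) (some 4) none))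
            :: "\n" :: mergePass (cs.dropWhile isBlank)
        else line :: mergePass ls
      | [] => line :: mergePass ls
    else line :: mergePass ls
termination_by ls => ls.length
decreasing_by
  · have h1 := List.length_dropWhile_le isBlank ls
    rw [hdw] at h1
    have h2 := List.length_dropWhile_le isBlank cs
    simp at h1 ⊢; omega
  · simp
  · simp
  · simp

-- pass 2 (Source B _collapse_paragraphs): fold with a paragraph buffer `buf`
def flushPara (buf : List String) : List String :=
  if buf.isEmpty then [] else [joinPara buf]

def collapsePass : List String → List String → List String
  | buf, [] => flushPara buf
  | buf, l :: ls =>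
    if isBlank l || isHash l then flushPara buf ++ l :: collapsePass [] ls
    else collapsePass (buf ++ [rstripNl l]) ls

def merge_headers_and_paragraphs_alt (lines : List String) : List String :=
  collapsePass [] (mergePass lines)

-- ===== PRECONDITION & SPEC =====
def Spec_merge_headers_and_paragraphs (lines : List String) (out : List String) : Prop := out = merge_headers_and_paragraphs_alt lines
instance (lines : List String) (out : List String) : Decidable (Spec_merge_headers_and_paragraphs lines out) := by unfold Spec_merge_headers_and_paragraphs; infer_instance

-- ===== CLAIM (what is proved, stated in full; the proofs are below) =====
def Claim_equal_merge_headers_and_paragraphs : Prop := ∀ (lines : List String), Dom_merge_headers_and_paragraphs lines → Spec_merge_headers_and_paragraphs lines (merge_headers_and_paragraphs lines)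

-- ===== LEMMAS AND PROOFS =====

lemma rstrip_cons_nonspace (a : Char) (t : List Char) (ha : PySem.Chars.isspace a = false) :
    PySem.Chars.rstrip (a :: t) = a :: PySem.Chars.rstrip t := by
  simp only [PySem.Chars.rstrip, List.reverse_cons, List.dropWhile_append]
  by_cases he : (List.dropWhile PySem.Chars.isspace t.reverse).isEmpty = true
  · rw [if_pos he]
    rw [List.isEmpty_iff] at he
    simp [he, ha]
  · rw [if_neg he]
    simp

lemma strip_hash (t : List Char) :
    PySem.Chars.strip ('#' :: t) = '#' :: PySem.Chars.rstrip t := by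
  have ha : PySem.Chars.isspace '#' = false := by decide
  simp [PySem.Chars.strip, PySem.Chars.lstrip, ha, rstrip_cons_nonspace _ _ ha]

lemma isHash_mkHeader (h2 h3 : String) : isHash (mkHeader h2 h3) = true := by
  simp only [isHash, mkHeader, PySem.Str.startswith, PySem.Str.strip, String.toList_ofList]
  rw [strip_hash]
  have hlit : "#".toList = ['#'] := by decide
  rw [hlit]
  simp [PySem.Chars.startswith, List.isPrefixOf]

lemma isHash_of_h2 {l : String} (h : PySem.Str.startswith (PySem.Str.strip l) "## " = true) :
    isHash l = true := by
  simp only [isHash, PySem.Str.startswith] at h ⊢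
  rw [PySem.Chars.startswith_iff] at h ⊢
  refine List.IsPrefix.trans ?_ h
  decide

-- unfolding equations for the two ports, one per branch
lemma A_h2_merge {l c : String} {ls cs : List String}
    (hh2 : PySem.Str.startswith (PySem.Str.strip l) "## " = true)
    (hdw : ls.dropWhile isBlank = c :: cs)
    (h3 : PySem.Str.startswith (PySem.Str.strip c) "### " = true) :
    merge_headers_and_paragraphs (l :: ls)
      = mkHeader (PySem.Str.strip (PySem.Str.slice (PySem.Str.strip l) (some 3) none))
          (PySem.Str.strip (PySem.Str.slice (PySem.Str.strip c) (some 4) none))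
        :: "\n" :: merge_headers_and_paragraphs (cs.dropWhile isBlank) := by
  rw [merge_headers_and_paragraphs]
  rw [if_pos hh2]
  split
  · next c' cs' heq =>
      rw [hdw] at heq
      cases heq
      rw [if_pos h3]
  · next heq =>
      rw [hdw] at heq
      simp at heq

lemma A_h2_no3 {l c : String} {ls cs : List String}
    (hh2 : PySem.Str.startswith (PySem.Str.strip l) "## " = true)
    (hdw : ls.dropWhile isBlank = c :: cs)
    (h3f : PySem.Str.startswith (PySem.Str.strip c) "### " = false) :
    merge_headers_and_paragraphs (l :: ls) = l :: merge_headers_and_paragraphs ls := by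
  rw [merge_headers_and_paragraphs]
  rw [if_pos hh2]
  split
  · next c' cs' heq =>
      rw [hdw] at heq
      cases heq
      rw [if_neg (by simp only [h3f]; simp)]
  · next heq =>
      rw [hdw] at heq
      try simp at heq

lemma A_h2_nil {l : String} {ls : List String}
    (hh2 : PySem.Str.startswith (PySem.Str.strip l) "## " = true)
    (hdw : ls.dropWhile isBlank = []) :
    merge_headers_and_paragraphs (l :: ls) = l :: merge_headers_and_paragraphs ls := by
  rw [merge_headers_and_paragraphs]
  rw [if_pos hh2]
  split
  · next c' cs' heq =>
      rw [hdw] at heq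
      simp at heq
  · next => rfl

lemma A_hash {l : String} {ls : List String}
    (hh2f : PySem.Str.startswith (PySem.Str.strip l) "## " = false)
    (hh : PySem.Str.startswith (PySem.Str.strip l) "#" = true) :
    merge_headers_and_paragraphs (l :: ls) = l :: merge_headers_and_paragraphs ls := by
  rw [merge_headers_and_paragraphs]
  rw [if_neg (by simp only [hh2f]; simp), if_pos hh]

lemma A_blank {l : String} {ls : List String}
    (hh2f : PySem.Str.startswith (PySem.Str.strip l) "## " = false)
    (hhf : PySem.Str.startswith (PySem.Str.strip l) "#" = false)
    (hbl : (PySem.Str.strip l == "") = true) :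
    merge_headers_and_paragraphs (l :: ls) = l :: merge_headers_and_paragraphs ls := by
  rw [merge_headers_and_paragraphs]
  rw [if_neg (by simp only [hh2f]; simp), if_neg (by simp only [hhf]; simp), if_pos hbl]

lemma A_body {l : String} {ls : List String}
    (hh2f : PySem.Str.startswith (PySem.Str.strip l) "## " = false)
    (hhf : PySem.Str.startswith (PySem.Str.strip l) "#" = false)
    (hblf : (PySem.Str.strip l == "") = false) :
    merge_headers_and_paragraphs (l :: ls)
      = joinPara (rstripNl l :: (ls.takeWhile keepBody).map rstripNl)
        :: merge_headers_and_paragraphs (ls.dropWhile keepBody) := by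
  rw [merge_headers_and_paragraphs]
  rw [if_neg (by simp only [hh2f]; simp), if_neg (by simp only [hhf]; simp), if_neg (by simp only [hblf]; simp)]

lemma M_h2_merge {l c : String} {ls cs : List String}
    (hh2 : PySem.Str.startswith (PySem.Str.strip l) "## " = true)
    (hdw : ls.dropWhile isBlank = c :: cs)
    (h3 : PySem.Str.startswith (PySem.Str.strip c) "### " = true) :
    mergePass (l :: ls)
      = mkHeader (PySem.Str.strip (PySem.Str.slice (PySem.Str.strip l) (some 3) none))
          (PySem.Str.strip (PySem.Str.slice (PySem.Str.strip c) (some 4) none))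
        :: "\n" :: mergePass (cs.dropWhile isBlank) := by
  rw [mergePass]
  rw [if_pos hh2]
  split
  · next c' cs' heq =>
      rw [hdw] at heq
      cases heq
      rw [if_pos h3]
  · next heq =>
      rw [hdw] at heq
      simp at heq

lemma M_h2_no3 {l c : String} {ls cs : List String}
    (hh2 : PySem.Str.startswith (PySem.Str.strip l) "## " = true)
    (hdw : ls.dropWhile isBlank = c :: cs)
    (h3f : PySem.Str.startswith (PySem.Str.strip c) "### " = false) :
    mergePass (l :: ls) = l :: mergePass ls := by
  rw [mergePass]
  rw [if_pos hh2]
  split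
  · next c' cs' heq =>
      rw [hdw] at heq
      cases heq
      rw [if_neg (by simp only [h3f]; simp)]
  · next heq =>
      rw [hdw] at heq
      try simp at heq

lemma M_h2_nil {l : String} {ls : List String}
    (hh2 : PySem.Str.startswith (PySem.Str.strip l) "## " = true)
    (hdw : ls.dropWhile isBlank = []) :
    mergePass (l :: ls) = l :: mergePass ls := by
  rw [mergePass]
  rw [if_pos hh2]
  split
  · next c' cs' heq =>
      rw [hdw] at heq
      simp at heq
  · next => rfl

lemma M_other {l : String} (ls : List String)
    (hh2f : PySem.Str.startswith (PySem.Str.strip l) "## " = false) :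
    mergePass (l :: ls) = l :: mergePass ls := by
  rw [mergePass]
  rw [if_neg (by simp only [hh2f]; simp)]

lemma keep_not_h2 {l : String} (hk : keepBody l = true) :
    PySem.Str.startswith (PySem.Str.strip l) "## " = false := by
  by_contra hc
  have := isHash_of_h2 (l := l) (by simpa using hc)
  simp [keepBody, this] at hk

lemma collapse_stop {l : String} (ls buf : List String) (h : (isBlank l || isHash l) = true) :
    collapsePass buf (l :: ls) = flushPara buf ++ l :: collapsePass [] ls := by
  simp [collapsePass, h]

lemma collapse_body {l : String} (ls buf : List String) (h : keepBody l = true) :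
    collapsePass buf (l :: ls) = collapsePass (buf ++ [rstripNl l]) ls := by
  have h' : (isBlank l || isHash l) = false := by
    cases hb : isBlank l <;> cases hh : isHash l <;> simp_all [keepBody]
  simp [collapsePass, h']

lemma mergePass_head_stop (m : String) (ms : List String) (hm : (isBlank m || isHash m) = true) :
    ∃ x X, mergePass (m :: ms) = x :: X ∧ (isBlank x || isHash x) = true := by
  by_cases h2 : PySem.Str.startswith (PySem.Str.strip m) "## " = true
  · rcases hdw : ms.dropWhile isBlank with _ | ⟨c, cs⟩
    · exact ⟨m, _, M_h2_nil h2 hdw, hm⟩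
    · by_cases h3 : PySem.Str.startswith (PySem.Str.strip c) "### " = true
      · exact ⟨_, _, M_h2_merge h2 hdw h3, by simp [isHash_mkHeader]⟩
      · exact ⟨m, _, M_h2_no3 h2 hdw (eq_false_of_ne_true h3), hm⟩
  · exact ⟨m, _, M_other ms (eq_false_of_ne_true h2), hm⟩

-- if the remaining input starts with a stop line (or is empty), a pending buffer can be flushed
lemma collapse_head_stop (ms buf : List String)
    (h : ms = [] ∨ ∃ m ms', ms = m :: ms' ∧ (isBlank m || isHash m) = true) :
    collapsePass buf (mergePass ms) = flushPara buf ++ collapsePass [] (mergePass ms) := by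
  rcases h with rfl | ⟨m, ms', rfl, hm⟩
  · simp [mergePass, collapsePass, flushPara]
  · obtain ⟨x, X, hx, hstop⟩ := mergePass_head_stop m ms' hm
    rw [hx, collapse_stop _ _ hstop, collapse_stop _ _ hstop]
    simp [flushPara]

lemma blank_newline : (isBlank "\n" || isHash "\n") = true := by decide

lemma stop_of_not_keep {l : String} (hk : ¬ keepBody l = true) :
    (isBlank l || isHash l) = true := by
  cases hb : isBlank l <;> cases hh : isHash l <;> simp_all [keepBody]

-- paragraph run: a non-empty buffer absorbs the next kept lines, then flushes
lemma para_lemma (ls : List String) :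
    ∀ buf : List String, buf ≠ [] →
    (∀ m : List String, m.length ≤ ls.length →
        merge_headers_and_paragraphs m = collapsePass [] (mergePass m)) →
    collapsePass buf (mergePass ls)
      = joinPara (buf ++ (ls.takeWhile keepBody).map rstripNl)
          :: merge_headers_and_paragraphs (ls.dropWhile keepBody) := by
  induction ls with
  | nil =>
    intro buf hbuf _
    simp [mergePass, collapsePass, flushPara, merge_headers_and_paragraphs, hbuf]
  | cons l ls' ih =>
    intro buf hbuf IH
    by_cases hk : keepBody l = true
    · rw [M_other ls' (keep_not_h2 hk), collapse_body _ _ hk]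
      rw [ih (buf ++ [rstripNl l]) (by simp) (fun m hm => IH m (by simp; omega))]
      simp [hk]
    · have hstop := stop_of_not_keep hk
      rw [collapse_head_stop (l :: ls') buf (Or.inr ⟨l, ls', rfl, hstop⟩)]
      rw [← IH (l :: ls') (by simp)]
      have hkf : keepBody l = false := eq_false_of_ne_true hk
      simp [flushPara, hbuf, hkf]

lemma main_lemma : ∀ (n : Nat) (ls : List String), ls.length ≤ n →
    merge_headers_and_paragraphs ls = collapsePass [] (mergePass ls) := by
  intro n
  induction n with
  | zero =>
    intro ls hls
    have : ls = [] := by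
      cases ls with
      | nil => rfl
      | cons a as => simp at hls
    subst this
    simp [merge_headers_and_paragraphs, mergePass, collapsePass, flushPara]
  | succ n ih =>
    intro ls hls
    rcases ls with _ | ⟨l, ls'⟩
    · simp [merge_headers_and_paragraphs, mergePass, collapsePass, flushPara]
    · have hls' : ls'.length ≤ n := by simp at hls; omega
      by_cases hh2 : PySem.Str.startswith (PySem.Str.strip l) "## " = true
      · have hstop : (isBlank l || isHash l) = true := by
          rw [Bool.or_eq_true]; exact Or.inr (isHash_of_h2 hh2)
        rcases hdw : ls'.dropWhile isBlank with _ | ⟨c, cs⟩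
        · rw [A_h2_nil hh2 hdw, M_h2_nil hh2 hdw,
              collapse_stop _ _ hstop, ih ls' hls']
          simp [flushPara]
        · by_cases h3 : PySem.Str.startswith (PySem.Str.strip c) "### " = true
          · have hrest : (cs.dropWhile isBlank).length ≤ n := by
              have h1 := List.length_dropWhile_le isBlank ls'
              rw [hdw] at h1
              have h2 := List.length_dropWhile_le isBlank cs
              simp at h1; omega
            rw [A_h2_merge hh2 hdw h3, M_h2_merge hh2 hdw h3,
                collapse_stop _ _ (by simp [isHash_mkHeader]),
                collapse_stop _ _ blank_newline, ih _ hrest]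
            simp [flushPara]
          · have h3f := eq_false_of_ne_true h3
            rw [A_h2_no3 hh2 hdw h3f, M_h2_no3 hh2 hdw h3f,
                collapse_stop _ _ hstop, ih ls' hls']
            simp [flushPara]
      · have hh2f := eq_false_of_ne_true hh2
        rw [M_other ls' hh2f]
        by_cases hhash : PySem.Str.startswith (PySem.Str.strip l) "#" = true
        · rw [A_hash hh2f hhash,
              collapse_stop _ _ (by rw [Bool.or_eq_true]; exact Or.inr (show isHash l = true from hhash)), ih ls' hls']
          simp [flushPara]
        · have hhf := eq_false_of_ne_true hhash
          by_cases hbl : (PySem.Str.strip l == "") = true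
          · rw [A_blank hh2f hhf hbl,
                collapse_stop _ _ (by rw [Bool.or_eq_true]; exact Or.inl (show isBlank l = true from hbl)), ih ls' hls']
            simp [flushPara]
          · have hblf := eq_false_of_ne_true hbl
            have hk : keepBody l = true := by
              have hb : isBlank l = false := hblf
              have hh' : isHash l = false := hhf
              simp [keepBody, hb, hh']
            rw [A_body hh2f hhf hblf, collapse_body _ _ hk]
            simp only [List.nil_append]
            rw [para_lemma ls' [rstripNl l] (by simp) (fun m hm => ih m (le_trans hm hls'))]
            simp

-- ===== VERDICT (by name: the statement is the Claim_ definition above) =====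
theorem merge_headers_and_paragraphs_spec : Claim_equal_merge_headers_and_paragraphs := by
  intro lines _
  unfold Spec_merge_headers_and_paragraphs merge_headers_and_paragraphs_alt
  exact main_lemma lines.length lines le_rfl
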